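-- pv_equiv track=rewrite | github.com/mohamedIzoughne/Primary_Key | primaryKey.py | turnIntoMinimal
-- ===== SOURCE A (Python) =====
-- def turnIntoMinimal(keys):
--     keys = list(keys) ## to iterate using index
--     minimalKeys = keys.copy()
--
--     def checkIfEveryPartExists(keyToCheck, keyToBeChecked):
--         for part in keyToCheck:
--             if part not in keyToBeChecked:
--                 return False
--         return True
--
--     for i in range(len(keys)):
--         minimal = keys[i]
--         for j in range(len(keys)):
--             if j != i and checkIfEveryPartExists(keys[j], minimal):
--                 minimalKeys.remove(minimal)
--                 break
--
--     return minimalKeys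
-- ===== SOURCE B (Python) =====
-- def turnIntoMinimal(keys):
--     keys = list(keys)
--     canon = [tuple(sorted(set(k))) for k in keys]
--     cnt = {}
--     for s in canon:
--         cnt[s] = cnt.get(s, 0) + 1
--     distinct = sorted(cnt, key=len)
--     kept = set()
--     seen = []
--     for s in distinct:
--         ss = set(s)
--         if cnt.get(s, 0) == 1 and not any(t <= ss for t in seen):
--             kept.add(s)
--         seen.append(ss)
--     return [keys[i] for i in range(len(keys)) if canon[i] in kept]
-- ===== Notes on version B (the rewrite author's own statement) =====
-- stated objective: faster
-- what changed: A's symmetric all-pairs list-membership subset scan with repeated list.remove is replaced by canonicalising each key to a sorted deduplicated tuple, counting duplicates in one dict pass, and doing a single size-ordered sweep over the distinct canonical sets that keeps a set if it is unique and no previously seen (smaller-or-equal) distinct set is contained in it.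
import Mathlib
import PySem

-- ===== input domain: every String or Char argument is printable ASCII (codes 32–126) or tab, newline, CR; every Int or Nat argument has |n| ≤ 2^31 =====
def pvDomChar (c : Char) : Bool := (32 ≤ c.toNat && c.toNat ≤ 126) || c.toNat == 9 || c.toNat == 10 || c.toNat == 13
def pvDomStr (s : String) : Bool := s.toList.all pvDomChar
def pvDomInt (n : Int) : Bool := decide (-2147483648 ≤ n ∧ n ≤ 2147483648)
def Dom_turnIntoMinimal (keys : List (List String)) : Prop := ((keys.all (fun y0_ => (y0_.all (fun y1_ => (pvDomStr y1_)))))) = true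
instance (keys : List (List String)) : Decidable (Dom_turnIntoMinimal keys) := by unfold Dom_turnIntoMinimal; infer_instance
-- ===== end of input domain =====

-- B replaces A's symmetric all-pairs subset scan with per-key canonical sorted sets, a counting
-- dict for duplicates and one size-ordered sweep over the distinct sets (objective: faster).

-- ===== PORT A =====
-- checkIfEveryPartExists: scan keyToCheck, early False on a part missing from keyToBeChecked
def pvCheck (keyToCheck keyToBeChecked : List String) : Bool :=
  match keyToCheck with
  | [] => true
  | part :: rest =>
      if part ∈ keyToBeChecked then pvCheck rest keyToBeChecked else false

-- the inner 'for j' loop: on the first hit, minimalKeys.remove(minimal) and break.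
-- '.remove' raises ValueError only when minimal is absent, which never happens here
-- (each flagged copy is removed once); the '.getD mk' fallback is that unreachable branch.
def pvInnerA (keys : List (List String)) (i : Int) (minimal : List String)
    (mk : List (List String)) : List Int → List (List String)
  | [] => mk
  | j :: rest =>
      if j ≠ i ∧ pvCheck (PySem.List.pyGetD keys j []) minimal = true then
        (PySem.List.remove? mk minimal).getD mk
      else pvInnerA keys i minimal mk rest

def turnIntoMinimal (keys : List (List String)) : List (List String) :=
  (PySem.List.pyRange 0 keys.length 1).foldl
    (fun minimalKeys i =>
      pvInnerA keys i (PySem.List.pyGetD keys i []) minimalKeys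
        (PySem.List.pyRange 0 keys.length 1))
    keys

-- ===== PORT B =====
-- tuple(sorted(set(k)))
def pvCanon (k : List String) : List String :=
  PySem.List.sorted (PySem.Set.ofList k) (fun x => x) false

def turnIntoMinimal_alt (keys : List (List String)) : List (List String) :=
  let canon := keys.map (fun k => pvCanon k)
  let cnt := canon.foldl (fun d s => d.insert s (d.getD s 0 + 1))
    (PySem.Dict.empty : PySem.Dict (List String) Int)
  let distinct := PySem.List.sorted cnt.keys (fun s => s.length) false
  let kept := (distinct.foldl
      (fun st s =>
        let ss := PySem.Set.ofList s
        (if cnt.getD s 0 == 1 && !(st.2.any fun t => PySem.Set.issubset t ss)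
          then PySem.Set.add st.1 s else st.1,
         st.2 ++ [ss]))
      ((PySem.Set.empty : PySem.Set (List String)), [])).1
  (PySem.List.pyRange 0 keys.length 1).foldl
    (fun out i =>
      if PySem.Set.contains kept (PySem.List.pyGetD canon i []) then
        out ++ [PySem.List.pyGetD keys i []]
      else out) []

-- ===== PRECONDITION & SPEC =====
def Spec_turnIntoMinimal (keys : List (List String)) (out : List (List String)) : Prop := out = turnIntoMinimal_alt keys
instance (keys : List (List String)) (out : List (List String)) : Decidable (Spec_turnIntoMinimal keys out) := by unfold Spec_turnIntoMinimal; infer_instance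

-- ===== CLAIM (what is proved, stated in full; the proofs are below) =====
def Claim_equal_turnIntoMinimal : Prop := ∀ (keys : List (List String)), Dom_turnIntoMinimal keys → Spec_turnIntoMinimal keys (turnIntoMinimal keys)

-- ===== LEMMAS AND PROOFS =====

-- w is a "subset" of v in A's sense: every part of w occurs in v
def pvSub (a b : List String) : Prop := ∀ x ∈ a, x ∈ b

-- the value-level removal condition both programs compute, phrased over the canonical forms:
-- c's key is dropped iff its canonical set occurs twice, or some other canonical set is contained in it
def pvR (canon : List (List String)) (c : List String) : Prop :=
  2 ≤ canon.count c ∨ ∃ d ∈ canon, d ≠ c ∧ pvSub d c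

def pvP (keys : List (List String)) (k : List String) : Bool :=
  let canon := keys.map (fun k => pvCanon k)
  decide (2 ≤ canon.count (pvCanon k)) ||
    canon.any (fun d => decide (d ≠ pvCanon k) && d.all (fun x => decide (x ∈ pvCanon k)))

theorem pvP_iff (keys : List (List String)) (k : List String) :
    pvP keys k = true ↔ pvR (keys.map (fun k => pvCanon k)) (pvCanon k) := by
  simp [pvP, pvR, pvSub, List.any_eq_true, and_comm]

theorem pvCheck_iff (a b : List String) : pvCheck a b = true ↔ pvSub a b := by
  induction a with
  | nil => simp [pvCheck, pvSub]
  | cons x rest ih => by_cases h : x ∈ b <;> simp [pvCheck, pvSub, h, ih]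

theorem mem_pvCanon (k : List String) (x : String) : x ∈ pvCanon k ↔ x ∈ k := by
  simp [pvCanon, PySem.List.mem_sorted, PySem.Set.mem_ofList]

theorem nodup_pvCanon (k : List String) : (pvCanon k).Nodup := by
  exact ((PySem.List.sorted_perm _ _ _).nodup_iff).mpr (PySem.Set.nodup_ofList k)

theorem pairwise_pvCanon (k : List String) : (pvCanon k).Pairwise (· ≤ ·) := by
  exact PySem.List.sorted_pairwise _ _

theorem pvSub_canon_iff (a b : List String) : pvSub (pvCanon a) (pvCanon b) ↔ pvSub a b := by
  simp [pvSub, mem_pvCanon]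

-- two canonical forms with the same members are equal
theorem canon_eq_of_mutual_sub {c d : List String}
    (hc : c.Pairwise (· ≤ ·)) (hd : d.Pairwise (· ≤ ·))
    (hnc : c.Nodup) (hnd : d.Nodup)
    (hdc : pvSub d c) (hcd : pvSub c d) : d = c := by
  refine List.Perm.eq_of_pairwise (fun a b _ _ h1 h2 => le_antisymm h1 h2) hd hc ?_
  exact (List.perm_ext_iff_of_nodup hnd hnc).mpr (fun a => ⟨fun h => hdc a h, fun h => hcd a h⟩)

-- a proper canonical subset is strictly shorter
theorem length_lt_of_proper_sub {c d : List String}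
    (hc : c.Pairwise (· ≤ ·)) (hd : d.Pairwise (· ≤ ·))
    (hnc : c.Nodup) (hnd : d.Nodup)
    (hdc : pvSub d c) (hne : d ≠ c) : d.length < c.length := by
  have hsub : d.toFinset ⊆ c.toFinset := by
    intro x hx; simp only [List.mem_toFinset] at *; exact hdc x hx
  have hle : d.toFinset.card ≤ c.toFinset.card := Finset.card_le_card hsub
  rw [List.toFinset_card_of_nodup hnd, List.toFinset_card_of_nodup hnc] at hle
  rcases lt_or_eq_of_le hle with h | h
  · exact h
  · exfalso; apply hne
    apply canon_eq_of_mutual_sub hc hd hnc hnd hdc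
    intro x hx
    have : c.toFinset = d.toFinset := by
      apply (Finset.eq_of_subset_of_card_le hsub ?_).symm
      rw [List.toFinset_card_of_nodup hnd, List.toFinset_card_of_nodup hnc]; omega
    have := this ▸ (List.mem_toFinset.mpr hx)
    exact List.mem_toFinset.mp this

theorem removeD_eq_erase (l : List (List String)) (v : List String) :
    (PySem.List.remove? l v).getD l = l.erase v := by
  by_cases h : v ∈ l
  · rw [PySem.List.remove?_eq_some_erase l v h]; rfl
  · rw [(PySem.List.remove?_eq_none_iff l v).mpr h, Option.getD_none, List.erase_of_not_mem h]

theorem pvInnerA_eq (keys : List (List String)) (i : Int) (minimal : List String)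
    (mk : List (List String)) (js : List Int) :
    pvInnerA keys i minimal mk js =
      if js.any (fun j => decide (j ≠ i) && pvCheck (PySem.List.pyGetD keys j []) minimal)
      then mk.erase minimal else mk := by
  induction js with
  | nil => simp [pvInnerA]
  | cons j rest ih =>
    by_cases h : j ≠ i ∧ pvCheck (PySem.List.pyGetD keys j []) minimal = true
    · simp [pvInnerA, h, removeD_eq_erase, h.1, h.2]
    · have hb : (decide (j ≠ i) && pvCheck (PySem.List.pyGetD keys j []) minimal) = false := by
        rcases Decidable.not_and_iff_not_or_not.mp h with h' | h' <;> simp [h'] at * <;> simp [*]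
      simp only [pvInnerA, List.any_cons, hb, Bool.false_or]
      rw [if_neg (by tauto)]
      exact ih

theorem foldl_erase_cons {α : Type} [BEq α] [LawfulBEq α] (F : List α) (l : List α) (x : α)
    (h : ∀ v ∈ F, v ≠ x) : F.foldl List.erase (x :: l) = x :: F.foldl List.erase l := by
  induction F generalizing l with
  | nil => rfl
  | cons v F ih =>
    simp only [List.foldl_cons]
    rw [List.erase_cons_tail (by simpa using fun e => h v (by simp) e.symm)]
    exact ih _ (fun w hw => h w (by simp [hw]))

theorem foldl_erase_filter {α : Type} [BEq α] [LawfulBEq α] (l : List α) (p : α → Bool) :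
    (l.filter p).foldl List.erase l = l.filter (fun x => !p x) := by
  induction l with
  | nil => rfl
  | cons x xs ih =>
    by_cases h : p x
    · simp only [List.filter_cons, h, if_pos, List.foldl_cons, List.erase_cons_head]
      simp [h, ih]
    · simp only [List.filter_cons, h]
      rw [foldl_erase_cons]
      · simp [h, ih]
      · intro v hv hvx
        have := List.of_mem_filter hv
        rw [hvx] at this; simp [h] at this

theorem foldl_if_erase {α : Type} [BEq α] [LawfulBEq α] (L : List α) (p : α → Bool) (init : List α) :
    L.foldl (fun mk k => if p k then mk.erase k else mk) init =
      (L.filter p).foldl List.erase init := by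
  induction L generalizing init with
  | nil => rfl
  | cons x xs ih =>
    by_cases h : p x <;> simp [List.filter_cons, h, ih]

-- A's inner-loop condition at index i equals the value-level predicate pvP of keys[i]
theorem flag_iff (keys : List (List String)) (i : Nat) (hi : i < keys.length) :
    ((PySem.List.pyRange 0 keys.length 1).any
        (fun j => decide (j ≠ (i : Int)) &&
          pvCheck (PySem.List.pyGetD keys j []) (PySem.List.pyGetD keys (i : Int) []))) =
      pvP keys keys[i] := by
  have hpg : PySem.List.pyGetD keys (i : Int) [] = keys[i] := PySem.List.pyGetD_ofNat keys i [] hi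
  rw [Bool.eq_iff_iff, List.any_eq_true, pvP_iff]
  have hperm : ((keys.map (fun k => pvCanon k))[i]'(by simpa using hi) ::
      (keys.map (fun k => pvCanon k)).eraseIdx i).Perm (keys.map (fun k => pvCanon k)) :=
    List.getElem_cons_eraseIdx_perm (by simpa using hi)
  have hci : (keys.map (fun k => pvCanon k))[i]'(by simpa using hi) = pvCanon keys[i] := by simp
  rw [hci] at hperm
  constructor
  · rintro ⟨j, hj, hcond⟩
    rw [PySem.List.mem_pyRange_one] at hj
    simp only [Bool.and_eq_true, decide_eq_true_eq] at hcond
    obtain ⟨hne, hchk⟩ := hcond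
    have hjn : j.toNat < keys.length := by omega
    have hpj : PySem.List.pyGetD keys j [] = keys[j.toNat] :=
      PySem.List.pyGetD_eq_getElem keys [] (by omega) (by exact_mod_cast hj.2)
    rw [hpj, hpg, pvCheck_iff] at hchk
    have hw : keys[j.toNat] ∈ keys.eraseIdx i :=
      List.mem_eraseIdx_iff_getElem.mpr ⟨j.toNat, hjn, by omega, rfl⟩
    have hd : pvCanon keys[j.toNat] ∈ (keys.map (fun k => pvCanon k)).eraseIdx i := by
      rw [List.eraseIdx_map]
      exact List.mem_map.mpr ⟨keys[j.toNat], hw, rfl⟩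
    by_cases hdc : pvCanon keys[j.toNat] = pvCanon keys[i]
    · left
      have : pvCanon keys[i] ∈ (keys.map (fun k => pvCanon k)).eraseIdx i := hdc ▸ hd
      have h1 : 1 ≤ ((keys.map (fun k => pvCanon k)).eraseIdx i).count (pvCanon keys[i]) :=
        List.one_le_count_iff.mpr this
      calc 2 ≤ (pvCanon keys[i] ::
            (keys.map (fun k => pvCanon k)).eraseIdx i).count (pvCanon keys[i]) := by
              rw [List.count_cons_self]; omega
        _ = _ := hperm.count_eq _
    · right
      exact ⟨pvCanon keys[j.toNat], hperm.mem_iff.mp (by simp [hd]), hdc,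
        (pvSub_canon_iff _ _).mpr hchk⟩
  · intro hR
    have key : ∃ w ∈ keys.eraseIdx i, pvSub w keys[i] := by
      rcases hR with hcnt | ⟨d, hdmem, hdne, hdsub⟩
      · have : pvCanon keys[i] ∈ (keys.map (fun k => pvCanon k)).eraseIdx i := by
          rw [← List.one_le_count_iff]
          have := hperm.count_eq (pvCanon keys[i])
          rw [List.count_cons_self] at this
          omega
        rw [List.eraseIdx_map] at this
        obtain ⟨w, hw, hwc⟩ := List.mem_map.mp this
        exact ⟨w, hw, (pvSub_canon_iff _ _).mp (by rw [hwc]; exact fun x hx => hx)⟩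
      · have : d ∈ (keys.map (fun k => pvCanon k)).eraseIdx i := by
          have := hperm.mem_iff.mpr hdmem
          simp only [List.mem_cons] at this
          tauto
        rw [List.eraseIdx_map] at this
        obtain ⟨w, hw, hwc⟩ := List.mem_map.mp this
        exact ⟨w, hw, (pvSub_canon_iff _ _).mp (by rw [hwc]; exact hdsub)⟩
    obtain ⟨w, hw, hsub⟩ := key
    obtain ⟨j, hjlt, hjne, hjval⟩ := List.mem_eraseIdx_iff_getElem.mp hw
    refine ⟨(j : Int), ?_, ?_⟩
    · rw [PySem.List.mem_pyRange_one]; omega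
    · have hpj : PySem.List.pyGetD keys (j : Int) [] = keys[j] :=
        PySem.List.pyGetD_ofNat keys j [] hjlt
      simp only [Bool.and_eq_true, decide_eq_true_eq]
      refine ⟨by exact_mod_cast hjne, ?_⟩
      rw [hpj, hpg, pvCheck_iff, hjval]; exact hsub

theorem A_char (keys : List (List String)) :
    turnIntoMinimal keys = keys.filter (fun k => ! pvP keys k) := by
  unfold turnIntoMinimal
  rw [PySem.List.foldl_congr_mem _ _
    (fun mk i => if pvP keys (PySem.List.pyGetD keys i []) = true
      then mk.erase (PySem.List.pyGetD keys i []) else mk) _ ?_]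
  · rw [PySem.List.foldl_pyRange_zero_pyGetD' keys []
      (fun mk k => if pvP keys k = true then mk.erase k else mk) keys]
    rw [foldl_if_erase keys (fun k => pvP keys k) keys, foldl_erase_filter keys (fun k => pvP keys k)]
  · intro mk i hi
    rw [PySem.List.mem_pyRange_one] at hi
    have hieq : i = ((i.toNat : Nat) : Int) := by omega
    rw [pvInnerA_eq, hieq, flag_iff keys i.toNat (by omega)]
    show _ = if pvP keys (PySem.List.pyGetD keys ((i.toNat : Nat) : Int) []) = true
        then mk.erase (PySem.List.pyGetD keys ((i.toNat : Nat) : Int) []) else mk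
    rw [PySem.List.pyGetD_ofNat keys i.toNat [] (by omega)]

-- membership in the kept-set after B's sweep
theorem mem_sweep (cond : List String → List (List String) → Bool)
    (g : List String → List String)
    (l : List (List String)) (K0 s0 : List (List String)) (x : List String) :
    (x ∈ (l.foldl
        (fun st s => (if cond s st.2 then PySem.Set.add st.1 s else st.1, st.2 ++ [g s]))
        (K0, s0)).1)
      ↔ x ∈ K0 ∨ ∃ l1 l2, l = l1 ++ x :: l2 ∧ cond x (s0 ++ l1.map g) = true := by
  induction l generalizing K0 s0 with
  | nil => simp
  | cons s rest ih =>
    simp only [List.foldl_cons]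
    rw [ih]
    constructor
    · rintro (hK | ⟨l1, l2, hsplit, hcond⟩)
      · by_cases hc : cond s s0 = true
        · rw [if_pos hc, PySem.Set.mem_add] at hK
          rcases hK with hK | rfl
          · exact Or.inl hK
          · exact Or.inr ⟨[], rest, rfl, by simpa using hc⟩
        · rw [if_neg hc] at hK; exact Or.inl hK
      · exact Or.inr ⟨s :: l1, l2, by simp [hsplit], by simpa using hcond⟩
    · rintro (hK | ⟨l1, l2, hsplit, hcond⟩)
      · left
        by_cases hc : cond s s0 = true
        · rw [if_pos hc, PySem.Set.mem_add]; exact Or.inl hK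
        · rwa [if_neg hc]
      · cases l1 with
        | nil =>
          simp only [List.nil_append, List.cons.injEq] at hsplit
          left
          obtain ⟨rfl, rfl⟩ := hsplit
          rw [if_pos (by simpa using hcond), PySem.Set.mem_add]
          exact Or.inr rfl
        | cons y l1' =>
          simp only [List.cons_append, List.cons.injEq] at hsplit
          right
          obtain ⟨rfl, hrest⟩ := hsplit
          exact ⟨l1', l2, hrest, by simpa using hcond⟩

-- the kept-set after the sweep holds exactly the canonical sets B keeps
theorem kept_iff (keys : List (List String)) (k : List String) (hk : k ∈ keys) :
    (PySem.Set.contains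
      ((PySem.List.sorted (PySem.Dict.counter (keys.map (fun k => pvCanon k))).keys
          (fun s => s.length) false).foldl
        (fun st s =>
          (if (PySem.Dict.counter (keys.map (fun k => pvCanon k))).getD s 0 == 1 &&
              !(st.2.any fun t => PySem.Set.issubset t (PySem.Set.ofList s))
            then PySem.Set.add st.1 s else st.1,
           st.2 ++ [PySem.Set.ofList s]))
        ((PySem.Set.empty : PySem.Set (List String)), [])).1
      (pvCanon k)) = ! pvP keys k := by
  set canon := keys.map (fun k => pvCanon k) with hcanon
  set c := pvCanon k with hc
  set distinct := PySem.List.sorted (PySem.Dict.counter canon).keys (fun s => s.length) false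
    with hdistinct
  have hck : ∀ t ∈ canon, t.Nodup ∧ t.Pairwise (· ≤ ·) ∧ PySem.Set.ofList t = t := by
    intro t ht
    obtain ⟨w, _, rfl⟩ := List.mem_map.mp ht
    exact ⟨nodup_pvCanon w, pairwise_pvCanon w,
      PySem.Set.ofList_eq_self_of_nodup _ (nodup_pvCanon w)⟩
  have hkeysd : (PySem.Dict.counter canon).keys = PySem.Set.ofList canon :=
    PySem.Dict.keys_counter canon
  have hdn : distinct.Nodup := by
    rw [hdistinct, hkeysd]
    exact ((PySem.List.sorted_perm _ _ _).nodup_iff).mpr (PySem.Set.nodup_ofList canon)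
  have hdmem : ∀ x, x ∈ distinct ↔ x ∈ canon := by
    intro x
    rw [hdistinct, hkeysd, PySem.List.mem_sorted, PySem.Set.mem_ofList]
  have hdpair : distinct.Pairwise (fun a b => a.length ≤ b.length) := by
    rw [hdistinct]
    exact PySem.List.sorted_pairwise _ _
  have hcmem : c ∈ canon := List.mem_map.mpr ⟨k, hk, rfl⟩
  rw [Bool.eq_iff_iff, PySem.Set.contains_iff, Bool.not_eq_eq_eq_not, Bool.not_true,
    ← Bool.not_eq_true, pvP_iff, ← hcanon, ← hc,
    mem_sweep (fun s seen => (PySem.Dict.counter canon).getD s 0 == 1 &&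
      !(seen.any fun t => PySem.Set.issubset t (PySem.Set.ofList s)))
      (fun s => PySem.Set.ofList s) distinct PySem.Set.empty []]
  simp only [show (PySem.Set.empty : PySem.Set (List String)) = [] from rfl,
    List.not_mem_nil, false_or, List.nil_append]
  constructor
  · rintro ⟨l1, l2, hsplit, hcond⟩
    simp only [Bool.and_eq_true, Bool.not_eq_true', List.any_eq_false,
      PySem.Dict.getD_counter] at hcond
    obtain ⟨hcnt1, hnosub⟩ := hcond
    have hcnt1 : canon.count c = 1 := by simpa using hcnt1
    rintro (h2 | ⟨d, hdc, hdne, hdsub⟩)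
    · omega
    · have hdd : d ∈ distinct := (hdmem d).mpr hdc
      rw [hsplit] at hdd
      rcases List.mem_append.mp hdd with hd1 | hd2
      · exact absurd ((PySem.Set.issubset_iff d c).mpr (fun x hx => hdsub x hx))
          (by have ht := hnosub (PySem.Set.ofList d) (List.mem_map_of_mem hd1)
              rw [(hck d hdc).2.2, (hck c hcmem).2.2] at ht
              simp [ht])
      · rcases List.mem_cons.mp hd2 with rfl | hd2
        · exact hdne rfl
        · have hpair := hdpair
          rw [hsplit] at hpair
          have hcd := (List.pairwise_append.mp hpair).2.1
          have hlen : c.length ≤ d.length := (List.pairwise_cons.mp hcd).1 d hd2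
          have := length_lt_of_proper_sub (hck c hcmem).2.1 (hck d hdc).2.1
            (hck c hcmem).1 (hck d hdc).1 hdsub hdne
          omega
  · intro hR
    obtain ⟨l1, l2, hsplit⟩ := List.append_of_mem ((hdmem c).mpr hcmem)
    refine ⟨l1, l2, hsplit, ?_⟩
    simp only [Bool.and_eq_true, Bool.not_eq_true', List.any_eq_false,
      PySem.Dict.getD_counter]
    have h1 : 1 ≤ canon.count c := List.one_le_count_iff.mpr hcmem
    have h2 : ¬ 2 ≤ canon.count c := fun h => hR (Or.inl h)
    refine ⟨by simp; omega, ?_⟩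
    intro t' ht1'
    obtain ⟨t, ht1, rfl⟩ := List.mem_map.mp ht1'
    have htd : t ∈ distinct := by rw [hsplit]; simp [ht1]
    have htc : t ∈ canon := (hdmem t).mp htd
    have htne : t ≠ c := by
      intro rfl_eq
      have hnd := hdn
      rw [hsplit] at hnd
      exact (List.disjoint_of_nodup_append hnd) ht1 (by simp [rfl_eq])
    rw [(hck t htc).2.2, (hck c hcmem).2.2]
    by_contra hcon
    simp only [PySem.Set.issubset_iff] at hcon
    exact hR (Or.inr ⟨t, htc, htne, fun x hx => hcon x hx⟩)

theorem B_char (keys : List (List String)) :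
    turnIntoMinimal_alt keys = keys.filter (fun k => ! pvP keys k) := by
  unfold turnIntoMinimal_alt
  dsimp only
  rw [PySem.Dict.foldl_insert_getD_add_one_eq_counter]
  rw [PySem.List.foldl_congr_mem _ _
    (fun out i => if (! pvP keys (PySem.List.pyGetD keys i [])) = true
      then out ++ [PySem.List.pyGetD keys i []] else out) _ ?_]
  · rw [PySem.List.foldl_pyRange_zero_pyGetD' keys []
      (fun out k => if (! pvP keys k) = true then out ++ [k] else out) []]
    rw [PySem.List.foldl_append_if (fun k => ! pvP keys k) (fun k => k) keys []]
    simp [List.map_id']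
  · intro out i hi
    rw [PySem.List.mem_pyRange_one] at hi
    have hg : PySem.List.pyGetD (keys.map (fun k => pvCanon k)) i [] =
        pvCanon (keys[i.toNat]'(by omega)) := by
      rw [PySem.List.pyGetD_eq_getElem (keys.map (fun k => pvCanon k)) []
        (by omega) (by simpa using hi.2)]
      simp
    have hg2 : PySem.List.pyGetD keys i [] = keys[i.toNat]'(by omega) :=
      PySem.List.pyGetD_eq_getElem keys [] (by omega) (by exact_mod_cast hi.2)
    beta_reduce
    rw [hg, hg2, kept_iff keys (keys[i.toNat]'(by omega)) (by simp)]

-- ===== VERDICT (by name: the statement is the Claim_ definition above) =====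
theorem turnIntoMinimal_spec : Claim_equal_turnIntoMinimal := by
  intro keys _
  unfold Spec_turnIntoMinimal
  rw [A_char, B_char]
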